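-- pv_equiv track=rewrite | github.com/ELHAMDOUNI123/2048 | xd.py | codeL
-- ===== SOURCE A (Python) =====
-- def codeL(a,b,c,d):
--     x=0#pop and for len just append dude
--     while x<5 :
--         if d=="0":d,c,b,a=c,b,a,"0"
--         if b=="0":b,a=a,"0"
--         if c=="0":c,b,a=b,a,"0"
--         if d=="0":d,c,b,a=c,b,a,"0"
--         x+=1
--     return a,b,c,d
-- ===== SOURCE B (Python) =====
-- def codeL(a, b, c, d):
--     vals = [v for v in (a, b, c, d) if v != "0"]
--     vals = ["0"] * (4 - len(vals)) + vals
--     return tuple(vals)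
-- ===== Notes on version B (the rewrite author's own statement) =====
-- stated objective: simpler
-- what changed: Replaces the 5-pass swap cascade over four variables by a single filter of the non-"0" values followed by front-padding with "0" to length 4.
import Mathlib
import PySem

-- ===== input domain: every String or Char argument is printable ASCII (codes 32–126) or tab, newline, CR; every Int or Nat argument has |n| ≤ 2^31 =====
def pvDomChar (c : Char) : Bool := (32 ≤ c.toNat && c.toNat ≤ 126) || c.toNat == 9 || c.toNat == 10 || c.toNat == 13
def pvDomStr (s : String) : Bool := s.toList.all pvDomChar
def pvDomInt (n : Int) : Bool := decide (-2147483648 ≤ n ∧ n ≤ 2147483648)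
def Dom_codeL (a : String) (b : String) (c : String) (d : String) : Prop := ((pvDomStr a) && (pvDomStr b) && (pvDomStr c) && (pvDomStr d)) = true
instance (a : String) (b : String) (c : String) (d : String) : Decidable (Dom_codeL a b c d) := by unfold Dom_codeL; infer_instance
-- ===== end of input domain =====

-- B replaces A's 5-pass swap cascade by one filter of the non-"0" values plus front-padding with "0" (simpler).

-- ===== PORT A =====
-- one iteration of A's while-loop body: the four conditional multi-assignments, in order
def codeLPass (s : String × String × String × String) : String × String × String × String :=
  let s := if s.2.2.2 == "0" then ("0", s.1, s.2.1, s.2.2.1) else s   -- if d=="0": d,c,b,a=c,b,a,"0"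
  let s := if s.2.1 == "0" then ("0", s.1, s.2.2.1, s.2.2.2) else s   -- if b=="0": b,a=a,"0"
  let s := if s.2.2.1 == "0" then ("0", s.1, s.2.1, s.2.2.2) else s   -- if c=="0": c,b,a=b,a,"0"
  if s.2.2.2 == "0" then ("0", s.1, s.2.1, s.2.2.1) else s            -- if d=="0": d,c,b,a=c,b,a,"0"

-- while x<5 : ... x+=1
def codeL (a : String) (b : String) (c : String) (d : String) : String × String × String × String :=
  (List.range 5).foldl (fun s _ => codeLPass s) (a, b, c, d)

-- ===== PORT B =====
def codeL_alt (a : String) (b : String) (c : String) (d : String) : String × String × String × String :=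
  let vals := [a, b, c, d].filter (fun v => v != "0")
  match List.replicate (4 - vals.length) "0" ++ vals with
  | [w, x, y, z] => (w, x, y, z)
  | _ => ("0", "0", "0", "0")   -- unreachable: the padded list always has length 4

-- ===== PRECONDITION & SPEC =====
def Spec_codeL (a : String) (b : String) (c : String) (d : String) (out : String × String × String × String) : Prop := out = codeL_alt a b c d
instance (a : String) (b : String) (c : String) (d : String) (out : String × String × String × String) : Decidable (Spec_codeL a b c d out) := by unfold Spec_codeL; infer_instance

-- ===== CLAIM (what is proved, stated in full; the proofs are below) =====
def Claim_equal_codeL : Prop := ∀ (a : String) (b : String) (c : String) (d : String), Dom_codeL a b c d → Spec_codeL a b c d (codeL a b c d)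

-- ===== LEMMAS AND PROOFS =====

-- one pass of A's swap cascade already yields the compacted tuple
theorem codeLPass_eq (a b c d : String) : codeLPass (a, b, c, d) = codeL_alt a b c d := by
  unfold codeLPass codeL_alt
  cases ha : a == "0" <;> cases hb : b == "0" <;> cases hc : c == "0" <;> cases hd : d == "0" <;>
    simp [ha, hb, hc, hd, List.filter, bne]
  all_goals exact eq_of_beq ha

-- the compacted tuple is a fixed point of the pass
theorem codeLPass_fix (a b c d : String) : codeLPass (codeL_alt a b c d) = codeL_alt a b c d := by
  unfold codeLPass codeL_alt
  cases ha : a == "0" <;> cases hb : b == "0" <;> cases hc : c == "0" <;> cases hd : d == "0" <;>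
    simp [ha, hb, hc, hd, List.filter, bne]

-- ===== VERDICT (by name: the statement is the Claim_ definition above) =====
theorem codeL_spec : Claim_equal_codeL := by
  intro a b c d _
  unfold Spec_codeL codeL
  simp only [List.range_succ, List.range_zero, List.nil_append, List.cons_append,
    List.foldl_cons, List.foldl_nil]
  rw [codeLPass_eq a b c d, codeLPass_fix a b c d, codeLPass_fix a b c d, codeLPass_fix a b c d,
    codeLPass_fix a b c d]
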